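-- pv_equiv track=rewrite | github.com/wonikjang/Projects_Python | udemy.py | single_char
-- ===== SOURCE A (Python) =====
-- def single_char(given_array):
--
--     single_item  = None
--     dict_count = {}
--
--     if given_array is None:
--         return None
--
--     for item in given_array:
--
--         if item not in dict_count.keys():
--             dict_count[item] = 1
--         else:
--             dict_count[item] += 1
--
--
--         if dict_count[item] == 1:
--             single_item = item
--
--
--     return single_item
-- ===== SOURCE B (Python) =====
-- def single_char(given_array):
--     if given_array is None:
--         return None
--     for i in range(len(given_array) - 1, -1, -1):
--         if given_array[i] not in given_array[:i]:
--             return given_array[i]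
--     return None
-- ===== Notes on version B (the rewrite author's own statement) =====
-- stated objective: alternative
-- what changed: Replaces A's left-to-right streaming pass with a count dictionary and first-sighting sentinel by a right-to-left index scan that returns the first element (from the end) with no earlier occurrence, tested by membership in the prefix; no dict and no sentinel are maintained.
import Mathlib
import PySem

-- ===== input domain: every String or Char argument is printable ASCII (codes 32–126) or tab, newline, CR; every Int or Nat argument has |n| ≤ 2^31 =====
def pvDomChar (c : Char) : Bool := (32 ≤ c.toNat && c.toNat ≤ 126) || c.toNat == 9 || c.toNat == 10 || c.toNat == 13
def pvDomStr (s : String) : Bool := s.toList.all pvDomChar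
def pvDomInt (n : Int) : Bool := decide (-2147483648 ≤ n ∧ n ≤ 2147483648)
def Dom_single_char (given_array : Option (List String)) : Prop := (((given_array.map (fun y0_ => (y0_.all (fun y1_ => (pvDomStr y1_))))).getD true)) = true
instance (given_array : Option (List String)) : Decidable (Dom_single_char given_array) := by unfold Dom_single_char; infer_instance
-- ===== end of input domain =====

-- B scans the array from the RIGHT and returns the first element (from the end) with no
-- earlier occurrence, replacing A's count dictionary and first-sighting sentinel (objective: alternative).

-- ===== PORT A =====
def pvStepA (st : Option String × PySem.Dict String Int) (item : String) :
    Option String × PySem.Dict String Int :=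
  let d := if st.2.contains item = false then st.2.insert item 1
           else st.2.modify item 0 (· + 1)
  let s := if d.getD item 0 == 1 then some item else st.1
  (s, d)

def single_char (given_array : Option (List String)) : Option String :=
  match given_array with
  | none => none
  | some arr =>
    (arr.foldl pvStepA (none, PySem.Dict.empty)).1

-- ===== PORT B =====
-- loop body of Source B's 'for i in range(len(arr)-1, -1, -1)': early return on first hit
def pvScanB (arr : List String) : List Int → Option String
  | [] => none
  | i :: is =>
    match PySem.List.pyGet? arr i with
    | none => none  -- unreachable: every index the range produces is in bounds
    | some x =>
      if x ∈ PySem.List.slice arr none (some i) then pvScanB arr is else some x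

def single_char_alt (given_array : Option (List String)) : Option String :=
  match given_array with
  | none => none
  | some arr =>
    pvScanB arr (PySem.List.pyRange ((arr.length : Int) - 1) (-1) (-1))

-- ===== PRECONDITION & SPEC =====
def Spec_single_char (given_array : Option (List String)) (out : Option String) : Prop := out = single_char_alt given_array
instance (given_array : Option (List String)) (out : Option String) : Decidable (Spec_single_char given_array out) := by unfold Spec_single_char; infer_instance

-- ===== CLAIM (what is proved, stated in full; the proofs are below) =====
def Claim_equal_single_char : Prop := ∀ (given_array : Option (List String)), Dom_single_char given_array → Spec_single_char given_array (single_char given_array)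

-- ===== LEMMAS AND PROOFS =====

-- A's loop invariant: the dict's keys are exactly the set st of elements seen so far,
-- every stored count is ≥ 1, and the sentinel is the last element added to st.
lemma single_char_loop (xs : List String) (s : Option String) (d : PySem.Dict String Int)
    (st : PySem.Set String)
    (hk : ∀ y, d.contains y = true ↔ y ∈ st)
    (hv : ∀ y, y ∈ st → 1 ≤ d.getD y 0)
    (hs : s = st.getLast?) :
    (xs.foldl pvStepA (s, d)).1 = (PySem.Set.update st xs).getLast? := by
  induction xs generalizing s d st with
  | nil => simpa [PySem.Set.update] using hs
  | cons x xs ih =>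
    simp only [List.foldl_cons]
    rw [show PySem.Set.update st (x :: xs) = PySem.Set.update (PySem.Set.add st x) xs from rfl]
    by_cases hc : d.contains x = true
    · have hxst : x ∈ st := (hk x).1 hc
      have h1 : 1 ≤ d.getD x 0 := hv x hxst
      have hstep : pvStepA (s, d) x = (s, d.modify x 0 (· + 1)) := by
        simp only [pvStepA, hc]
        simp only [Bool.true_eq_false, if_false]
        rw [PySem.Dict.getD_modify_self]
        have hne : (d.getD x 0 + 1 == (1 : Int)) = false := by simp; omega
        rw [hne]
        simp
      rw [hstep, PySem.Set.add_of_mem hxst]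
      refine ih s (d.modify x 0 (· + 1)) st ?_ ?_ hs
      · intro y
        rw [PySem.Dict.contains_modify]
        simp only [Bool.or_eq_true, beq_iff_eq]
        constructor
        · rintro (h | h)
          · subst h; exact hxst
          · exact (hk y).1 h
        · intro h; right; exact (hk y).2 h
      · intro y hy
        rw [PySem.Dict.getD_modify]
        split_ifs with h
        · subst h; have := hv y hy; omega
        · exact hv y hy
    · have hxst : x ∉ st := fun h => hc ((hk x).2 h)
      have hstep : pvStepA (s, d) x = (some x, d.insert x 1) := by
        simp only [pvStepA, hc]
        simp [PySem.Dict.getD_insert_self]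
      rw [hstep]
      have hadd : PySem.Set.add st x = st ++ [x] := PySem.Set.add_of_not_mem hxst
      refine ih (some x) (d.insert x 1) (PySem.Set.add st x) ?_ ?_ ?_
      · intro y
        rw [PySem.Dict.contains_insert, hadd]
        simp only [Bool.or_eq_true, beq_iff_eq, List.mem_append, List.mem_singleton]
        constructor
        · rintro (h | h)
          · right; exact h
          · left; exact (hk y).1 h
        · rintro (h | h)
          · right; exact (hk y).2 h
          · left; exact h
      · intro y hy
        rw [PySem.Dict.getD_insert]
        split_ifs with h
        · omega
        · rw [hadd] at hy
          rcases List.mem_append.1 hy with h' | h'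
          · exact hv y h'
          · simp at h'; exact absurd h' h
      · rw [hadd]; simp

-- B's scan ignores an appended element when every index is in arr's range
lemma pvScanB_append (arr : List String) (x : String) (is : List Int)
    (h : ∀ i ∈ is, 0 ≤ i ∧ i < (arr.length : Int)) :
    pvScanB (arr ++ [x]) is = pvScanB arr is := by
  induction is with
  | nil => rfl
  | cons i is ih =>
    obtain ⟨h0, hlt⟩ := h i (List.mem_cons_self ..)
    have hnat : i.toNat < arr.length := by omega
    have hget : PySem.List.pyGet? (arr ++ [x]) i = PySem.List.pyGet? arr i := by
      rw [PySem.List.pyGet?_of_nonneg _ h0, PySem.List.pyGet?_of_nonneg _ h0,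
        List.getElem?_append_left hnat]
    have hslice : PySem.List.slice (arr ++ [x]) none (some i) =
        PySem.List.slice arr none (some i) := by
      rw [PySem.List.slice_to _ h0, PySem.List.slice_to _ h0,
        List.take_append_of_le_length (by omega)]
    simp only [pvScanB, hget, hslice]
    cases PySem.List.pyGet? arr i with
    | none => rfl
    | some y =>
      by_cases hy : y ∈ PySem.List.slice arr none (some i) <;>
        simp [hy, ih (fun j hj => h j (List.mem_cons_of_mem _ hj))]

-- B's reverse scan computes the last first-seen distinct element
lemma pvScanB_eq (arr : List String) :
    pvScanB arr (PySem.List.pyRange ((arr.length : Int) - 1) (-1) (-1)) =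
      (PySem.Set.ofList arr).getLast? := by
  induction arr using List.reverseRecOn with
  | nil => simp [PySem.List.pyRange_neg_one_eq_nil, pvScanB]
  | append_singleton arr x ih =>
    have hlen : ((arr ++ [x]).length : Int) - 1 = (arr.length : Int) := by
      simp
    rw [hlen, PySem.List.pyRange_neg_one_cons (by omega)]
    have hget : PySem.List.pyGet? (arr ++ [x]) (arr.length : Int) = some x := by
      rw [PySem.List.pyGet?_of_nonneg _ (by omega)]
      simp
    have hslice : PySem.List.slice (arr ++ [x]) none (some (arr.length : Int)) = arr := by
      rw [PySem.List.slice_to _ (by omega)]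
      simp
    simp only [pvScanB, hget, hslice]
    rw [PySem.Set.ofList_append_singleton]
    by_cases hx : x ∈ arr
    · rw [if_pos hx, PySem.Set.add_of_mem (by rwa [PySem.Set.mem_ofList])]
      rw [pvScanB_append arr x _
        (fun i hi => by
          have := (PySem.List.mem_pyRange_neg_one).1 hi
          omega)]
      exact ih
    · rw [if_neg hx, PySem.Set.add_of_not_mem (by rwa [PySem.Set.mem_ofList])]
      simp

-- ===== VERDICT (by name: the statement is the Claim_ definition above) =====
theorem single_char_spec : Claim_equal_single_char := by
  intro g _
  unfold Spec_single_char single_char single_char_alt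
  match g with
  | none => rfl
  | some arr =>
    simp only
    rw [single_char_loop arr none PySem.Dict.empty []
        (by intro y; simp [PySem.Dict.contains_empty]) (by intro y hy; simp at hy) rfl]
    rw [show PySem.Set.update [] arr = PySem.Set.ofList arr from PySem.Set.update_nil_left arr]
    exact (pvScanB_eq arr).symm
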